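-- pv_equiv track=rewrite | github.com/tnjordan/aoc | 2022/day25.py | d_to_S
-- ===== SOURCE A (Python) =====
-- def d_to_S(snafu,i):
--     prev_c = snafu[i-1]
--     if prev_c == '=':
--         prev_c = '-'
--     elif prev_c == '-':
--         prev_c = '0'
--     else:
--         prev_c = str(int(prev_c)+1)
--     if prev_c in '-012':
--         snafu[i-1] = prev_c
--     else:
--         if prev_c == '3':
--             prev_c = '='
--         elif prev_c == '4':
--             prev_c = '-'
--         snafu[i-1] = prev_c
--         snafu = d_to_S(snafu,i-1)
--
--     return snafu
-- ===== SOURCE B (Python) =====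
-- def d_to_S(snafu, i):
--     carry_fix = {'3': '=', '4': '-'}
--     j = i - 1
--     while True:
--         c = snafu[j]
--         if c == '=':
--             c = '-'
--         elif c == '-':
--             c = '0'
--         else:
--             c = str(int(c) + 1)
--         if c in '-012':
--             snafu[j] = c
--             return snafu
--         snafu[j] = carry_fix.get(c, c)
--         j -= 1
-- ===== Notes on version B (the rewrite author's own statement) =====
-- stated objective: simpler
-- what changed: Replaces the tail recursion by an explicit while-True loop over a walking index j and replaces the '3'/'4' fix-up branch chain by a dict lookup carry_fix.get(c, c); same in-place mutation and digit mapping.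
import Mathlib
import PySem

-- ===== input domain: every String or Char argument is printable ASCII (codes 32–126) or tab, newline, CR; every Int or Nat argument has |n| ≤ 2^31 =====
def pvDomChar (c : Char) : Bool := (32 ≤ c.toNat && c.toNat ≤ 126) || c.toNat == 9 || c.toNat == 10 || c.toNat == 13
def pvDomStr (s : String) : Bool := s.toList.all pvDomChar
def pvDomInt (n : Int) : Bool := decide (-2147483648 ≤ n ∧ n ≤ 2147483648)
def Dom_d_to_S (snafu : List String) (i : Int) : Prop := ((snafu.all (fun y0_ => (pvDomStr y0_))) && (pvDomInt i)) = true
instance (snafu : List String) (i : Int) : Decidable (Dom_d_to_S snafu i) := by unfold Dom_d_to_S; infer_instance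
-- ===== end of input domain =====

-- B replaces A's tail recursion by an explicit while-loop over a walking index with a
-- dict-based carry fix-up (objective: simpler, iterative decomposition; same cost).
-- Both A and B mutate the input list in place in Python; the equivalence proved here is
-- about the RETURN value (the two Pythons perform identical mutations).

-- ===== PORT A =====
-- A raises IndexError (pyGet? = none) or ValueError (ofStr? = none) outside Pre_；
-- the port returns the current list there (excluded by Pre_d_to_S).
def d_to_S (snafu : List String) (i : Int) : List String :=
  match h : PySem.List.pyGet? snafu (i - 1) with
  | none => snafu
  | some c =>
    match (if c = "=" then some "-"
           else if c = "-" then some "0"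
           else (PySem.Int.ofStr? c).map (fun n => PySem.Int.toStr (n + 1))) with
    | none => snafu
    | some prev_c =>
      if PySem.Str.isIn prev_c "-012" then
        PySem.List.pySetD snafu (i - 1) prev_c
      else
        let prev_c2 := if prev_c = "3" then "=" else if prev_c = "4" then "-" else prev_c
        d_to_S (PySem.List.pySetD snafu (i - 1) prev_c2) (i - 1)
termination_by (i + snafu.length).toNat
decreasing_by
  have hin : PySem.Raise.InRange snafu.length (i - 1) := by
    by_contra hc
    rw [← PySem.List.pyGet?_eq_none_iff] at hc
    simp [hc] at h
  obtain ⟨h1, h2⟩ := hin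
  simp only [PySem.List.length_pySetD]
  omega

-- ===== PORT B =====
-- increment map applied to the digit read at the current index ('='→'-', '-'→'0', else str(int+1))
def dToSInc (c : String) : Option String :=
  if c = "=" then some "-"
  else if c = "-" then some "0"
  else (PySem.Int.ofStr? c).map (fun n => PySem.Int.toStr (n + 1))

-- the literal dict {'3': '=', '4': '-'} of Source B
def dToSCarryFix : PySem.Dict String String := PySem.Dict.ofList [("3", "="), ("4", "-")]

-- the 'while True' loop of Source B, walking index j
def dToSLoop (snafu : List String) (j : Int) : List String :=
  match h : PySem.List.pyGet? snafu j with
  | none => snafu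
  | some c0 =>
    match dToSInc c0 with
    | none => snafu
    | some c =>
      if PySem.Str.isIn c "-012" then
        PySem.List.pySetD snafu j c
      else
        dToSLoop (PySem.List.pySetD snafu j (PySem.Dict.getD dToSCarryFix c c)) (j - 1)
termination_by (j + snafu.length + 1).toNat
decreasing_by
  have hin : PySem.Raise.InRange snafu.length j := by
    by_contra hc
    rw [← PySem.List.pyGet?_eq_none_iff] at hc
    simp [hc] at h
  obtain ⟨h1, h2⟩ := hin
  simp only [PySem.List.length_pySetD]
  omega

def d_to_S_alt (snafu : List String) (i : Int) : List String :=
  dToSLoop snafu (i - 1)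

-- ===== PRECONDITION & SPEC =====
-- Helpers classifying ONE digit string, used only to state Pre_.
def pvStep (c : String) : Option String :=
  if c = "=" then some "-"
  else if c = "-" then some "0"
  else (PySem.Int.ofStr? c).map (fun n => PySem.Int.toStr (n + 1))

def pvStops (c : String) : Bool :=
  match pvStep c with
  | some s => PySem.Str.isIn s "-012"
  | none => false

def pvCarries (c : String) : Bool :=
  match pvStep c with
  | some s => !PySem.Str.isIn s "-012"
  | none => false

def pvCarryOut (c : String) : String :=
  let s := (pvStep c).getD ""
  if s = "3" then "=" else if s = "4" then "-" else s

-- the digit A READS at Python index k (k < 0 re-reads a cell the carry already rewrote once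
-- when that cell was visited at the non-negative index k + len)
def pvEff (snafu : List String) (i k : Int) : String :=
  if k < 0 ∧ k + (snafu.length : Int) ≤ i - 1 then
    pvCarryOut ((PySem.List.pyGet? snafu k).getD "")
  else
    (PySem.List.pyGet? snafu k).getD ""

-- Pre_ = exactly the inputs where Python A returns: the start index is in range and the
-- carry chain (indices i-1, i-2, …) reaches a stopping digit after t carrying digits,
-- before falling off the front (IndexError) or hitting an unparsable digit (ValueError).
def Pre_d_to_S (snafu : List String) (i : Int) : Prop :=
  -(snafu.length : Int) ≤ i - 1 ∧ i - 1 < (snafu.length : Int) ∧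
  ∃ t : Nat, t < (i - 1 + (snafu.length : Int)).toNat + 1 ∧
    pvStops (pvEff snafu i (i - 1 - t)) = true ∧
    ∀ u : Nat, u < t → pvCarries (pvEff snafu i (i - 1 - u)) = true

instance (snafu : List String) (i : Int) : Decidable (Pre_d_to_S snafu i) := by
  unfold Pre_d_to_S; infer_instance

def pvWitness_d_to_S : List String × Int := (["2", "2"], 2)

def Spec_d_to_S (snafu : List String) (i : Int) (out : List String) : Prop := out = d_to_S_alt snafu i
instance (snafu : List String) (i : Int) (out : List String) : Decidable (Spec_d_to_S snafu i out) := by unfold Spec_d_to_S; infer_instance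

-- ===== CLAIM (what is proved, stated in full; the proofs are below) =====
def Claim_equal_d_to_S : Prop := ∀ (snafu : List String) (i : Int), Dom_d_to_S snafu i → Pre_d_to_S snafu i → Spec_d_to_S snafu i (d_to_S snafu i)

-- ===== LEMMAS AND PROOFS =====

-- Source B's carry_fix.get(c, c) is A's if-chain
lemma carryFix_getD (s : String) :
    PySem.Dict.getD dToSCarryFix s s = (if s = "3" then "=" else if s = "4" then "-" else s) := by
  by_cases h3 : s = "3"
  · subst h3; decide
  by_cases h4 : s = "4"
  · subst h4; decide
  have hd : dToSCarryFix = PySem.Dict.mk [("3", "="), ("4", "-")] := by decide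
  rw [hd, PySem.Dict.getD_eq_get?_getD, PySem.Dict.get?_mk_cons, PySem.Dict.get?_mk_cons]
  have h3' : ("3" == s) = false := by simp; exact fun he => h3 he.symm
  have h4' : ("4" == s) = false := by simp; exact fun he => h4 he.symm
  simp [h3, h4, h3', h4', PySem.Dict.get?]

-- the ports agree on EVERY input (both return the current list where Python raises)
lemma ports_eq (snafu : List String) (i : Int) : d_to_S snafu i = dToSLoop snafu (i - 1) := by
  fun_induction d_to_S snafu i with
  | case1 snafu i h =>
      rw [dToSLoop]; split
      · rfl
      · next c0 heq => simp [h] at heq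
  | case2 snafu i c h hstep =>
      rw [dToSLoop]; split
      · rfl
      · next c0 heq =>
          rw [h] at heq; injection heq with hc; subst hc
          split
          · rfl
          · next c' heq2 =>
              have hs : dToSInc c = none := hstep
              rw [hs] at heq2; cases heq2
  | case3 snafu i c h prev_c hstep hin =>
      rw [dToSLoop]; split
      · next heq => simp [h] at heq
      · next c0 heq =>
          rw [h] at heq; injection heq with hc; subst hc
          split
          · next heq2 =>
              have hs : dToSInc c = some prev_c := hstep
              rw [hs] at heq2; cases heq2
          · next c' heq2 =>
              have hs : dToSInc c = some prev_c := hstep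
              rw [hs] at heq2; injection heq2 with hc2; subst hc2
              split
              · rfl
              · next hcond => exact absurd hin hcond
  | case4 snafu i c h prev_c hstep hnot prev_c2 ih =>
      rw [dToSLoop]; split
      · next heq => simp [h] at heq
      · next c0 heq =>
          rw [h] at heq; injection heq with hc; subst hc
          split
          · next heq2 =>
              have hs : dToSInc c = some prev_c := hstep
              rw [hs] at heq2; cases heq2
          · next c' heq2 =>
              have hs : dToSInc c = some prev_c := hstep
              rw [hs] at heq2; injection heq2 with hc2; subst hc2
              split
              · next hcond => exact absurd hcond hnot
              · rw [carryFix_getD]; exact ih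

-- ===== VERDICT (by name: the statement is the Claim_ definition above) =====
theorem d_to_S_spec : Claim_equal_d_to_S := by
  intro snafu i _ _
  unfold Spec_d_to_S d_to_S_alt
  exact ports_eq snafu i
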